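-- pv_equiv track=rewrite | github.com/oshan35/LeetCode | PythonSolutions/palindrom.py | Plindrom
-- ===== SOURCE A (Python) =====
-- def Plindrom(strPara):
--     excluded = [" ",'0','1','2','3','4','5','6','7','8','9','.',"'",";",":"]
--     #strPara = strPara.replace(" ","")
--     isPalindrom = True
--
--     p1 = 0
--     p2 = len(strPara)-1
--
--     while p1 < p2:
--         if strPara[p1] in excluded:
--             p1+=1
--             continue
--         elif strPara[p2] in excluded:
--             p2-=1
--             continue
--
--         if strPara[p1] != strPara[p2]:
--             isPalindrom = False
--             break
--         p1+=1
--         p2-=1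
--     return isPalindrom
-- ===== SOURCE B (Python) =====
-- def Plindrom(strPara):
--     excluded = [" ",'0','1','2','3','4','5','6','7','8','9','.',"'",";",":"]
--     kept = [c for c in strPara if c not in excluded]
--     return kept == kept[::-1]
-- ===== Notes on version B (the rewrite author's own statement) =====
-- stated objective: simpler
-- what changed: Replaces the interleaved two-pointer walk with skip-continues by a single filter pass keeping non-excluded characters followed by one comparison of the kept list with its reverse.
import Mathlib
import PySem

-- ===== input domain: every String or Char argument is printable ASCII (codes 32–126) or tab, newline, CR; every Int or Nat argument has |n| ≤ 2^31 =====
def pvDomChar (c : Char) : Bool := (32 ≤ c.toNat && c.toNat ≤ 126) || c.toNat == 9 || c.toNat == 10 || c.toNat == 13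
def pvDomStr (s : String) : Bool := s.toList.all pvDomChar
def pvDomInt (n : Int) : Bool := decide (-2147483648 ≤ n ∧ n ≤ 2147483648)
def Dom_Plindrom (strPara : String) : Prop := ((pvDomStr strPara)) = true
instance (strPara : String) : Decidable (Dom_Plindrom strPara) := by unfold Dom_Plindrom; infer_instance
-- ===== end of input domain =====

-- B replaces A's interleaved two-pointer skip walk by filter-then-compare-with-reverse (simpler decomposition, same O(n)).

-- ===== PORT A =====
-- the 15 excluded one-character strings, as characters
def pvExcluded : List Char := [' ', '0', '1', '2', '3', '4', '5', '6', '7', '8', '9', '.', '\'', ';', ':']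

-- A's while loop; indices are Python ints. strPara[p1]/strPara[p2] via pyGet?; during the loop
-- both indices are always in range (0 ≤ p1 < p2 ≤ len-1), so the `none` branch is unreachable.
def pvLoopA (cs : List Char) (p1 p2 : Int) : Bool :=
  if _h : p1 < p2 then
    match PySem.List.pyGet? cs p1, PySem.List.pyGet? cs p2 with
    | some c1, some c2 =>
      if pvExcluded.contains c1 then pvLoopA cs (p1 + 1) p2
      else if pvExcluded.contains c2 then pvLoopA cs p1 (p2 - 1)
      else if c1 ≠ c2 then false
      else pvLoopA cs (p1 + 1) (p2 - 1)
    | _, _ => true  -- unreachable from Plindrom's initial call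
  else true
termination_by (p2 - p1).toNat
decreasing_by all_goals omega

def Plindrom (strPara : String) : Bool :=
  pvLoopA strPara.toList 0 ((strPara.toList.length : Int) - 1)

-- ===== PORT B =====
def Plindrom_alt (strPara : String) : Bool :=
  let kept := strPara.toList.filter (fun c => ¬ pvExcluded.contains c)
  kept == kept.reverse

-- ===== PRECONDITION & SPEC =====
def Spec_Plindrom (strPara : String) (out : Bool) : Prop := out = Plindrom_alt strPara
instance (strPara : String) (out : Bool) : Decidable (Spec_Plindrom strPara out) := by unfold Spec_Plindrom; infer_instance

-- ===== CLAIM (what is proved, stated in full; the proofs are below) =====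
def Claim_equal_Plindrom : Prop := ∀ (strPara : String), Dom_Plindrom strPara → Spec_Plindrom strPara (Plindrom strPara)

-- ===== LEMMAS AND PROOFS =====

-- palindrome predicate on a char list
def pvPal (l : List Char) : Bool := l == l.reverse

-- the filtered segment cs[a .. b1) (b1 exclusive), Nat indices
def pvSeg (cs : List Char) (a b1 : Nat) : List Char :=
  ((cs.take b1).drop a).filter (fun c => ¬ pvExcluded.contains c)

theorem pvPal_short (l : List Char) (h : l.length ≤ 1) : pvPal l = true := by
  unfold pvPal
  match l, h with
  | [], _ => rfl
  | [x], _ => simp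

theorem pvPal_sandwich (x y : Char) (m : List Char) :
    pvPal (x :: m ++ [y]) = ((x == y) && pvPal m) := by
  by_cases h : x = y
  · subst h; simp [pvPal, List.reverse_append]
  · have hb : (x == y) = false := by simp [h]
    simp [pvPal, List.reverse_append, hb]

theorem pvSeg_short (cs : List Char) (a b1 : Nat) (h : b1 ≤ a + 1) :
    pvPal (pvSeg cs a b1) = true := by
  refine pvPal_short _ ?_
  calc (pvSeg cs a b1).length
      ≤ ((cs.take b1).drop a).length := List.length_filter_le _ _
    _ ≤ 1 := by simp [List.length_drop, List.length_take]; omega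

-- main loop invariant: A's loop computes the palindrome test of the filtered segment
theorem pvLoopA_eq (fuel : Nat) (cs : List Char) (p1 p2 : Int)
    (hf : (p2 - p1).toNat ≤ fuel) (h1 : 0 ≤ p1) (h2 : p2 < cs.length) :
    pvLoopA cs p1 p2 = pvPal (pvSeg cs p1.toNat (p2 + 1).toNat) := by
  induction fuel generalizing p1 p2 with
  | zero =>
    have hle : ¬ p1 < p2 := by omega
    rw [pvLoopA]
    simp only [hle, dif_neg, not_false_iff]
    exact (pvSeg_short cs _ _ (by omega)).symm
  | succ n ih =>
    by_cases hlt : p1 < p2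
    · -- indices in range
      have ha : p1.toNat < cs.length := by omega
      have hb : p2.toNat < cs.length := by omega
      have hr1 : PySem.List.pyGet? cs p1 = some (cs[p1.toNat]'ha) :=
        PySem.List.pyGet?_eq_some_getElem cs h1 (by omega)
      have hr2 : PySem.List.pyGet? cs p2 = some (cs[p2.toNat]'hb) :=
        PySem.List.pyGet?_eq_some_getElem cs (by omega) (by omega)
      set c1 := cs[p1.toNat]'ha with hc1
      set c2 := cs[p2.toNat]'hb with hc2
      -- head decomposition
      have hdrop : (cs.take (p2+1).toNat).drop p1.toNat
          = c1 :: (cs.take (p2+1).toNat).drop (p1.toNat + 1) := by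
        have hlen : p1.toNat < (cs.take (p2+1).toNat).length := by
          simp [List.length_take]; omega
        rw [List.drop_eq_getElem_cons hlen]
        congr 1
        exact List.getElem_take
      -- tail decomposition
      have htake : cs.take (p2+1).toNat = cs.take p2.toNat ++ [c2] := by
        have he : (p2+1).toNat = p2.toNat + 1 := by omega
        rw [he, List.take_add_one, List.getElem?_eq_getElem hb]
        rfl
      have hn1 : (p1 + 1).toNat = p1.toNat + 1 := by omega
      have hn2 : (p2 - 1 + 1).toNat = p2.toNat := by omega
      rw [pvLoopA]
      simp only [hlt, dif_pos, hr1, hr2]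
      by_cases e1 : c1 ∈ pvExcluded
      · -- skip left
        simp only [List.contains_eq_mem, e1, decide_true, if_pos]
        rw [ih (p1+1) p2 (by omega) (by omega) h2]
        unfold pvSeg
        rw [hdrop, hn1, List.filter_cons]
        simp [e1]
      · by_cases e2 : c2 ∈ pvExcluded
        · -- skip right
          simp only [List.contains_eq_mem, e1, e2, decide_true, decide_false,
            if_neg, if_pos, Bool.false_eq_true, not_false_iff]
          rw [ih p1 (p2-1) (by omega) h1 (by omega)]
          unfold pvSeg
          rw [hn2, htake]
          have hle : p1.toNat ≤ (cs.take p2.toNat).length := by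
            simp [List.length_take]; omega
          rw [List.drop_append_of_le_length hle, List.filter_append]
          simp [e2]
        · -- both kept: seg = c1 :: inner seg ++ [c2]
          have hle : p1.toNat + 1 ≤ (cs.take p2.toNat).length := by
            simp [List.length_take]; omega
          have hdt : (cs.take p2.toNat ++ [c2]).drop (p1.toNat + 1)
              = (cs.take p2.toNat).drop (p1.toNat + 1) ++ [c2] :=
            List.drop_append_of_le_length hle
          have hseg : pvSeg cs p1.toNat (p2+1).toNat
              = c1 :: pvSeg cs (p1.toNat + 1) p2.toNat ++ [c2] := by
            unfold pvSeg
            rw [hdrop, htake, hdt, List.filter_cons, List.filter_append]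
            simp [e1, e2]
          by_cases hne : c1 = c2
          · simp only [List.contains_eq_mem, e2, decide_false,
              Bool.false_eq_true, if_neg, not_false_iff, hne, ne_eq,
              not_true_eq_false]
            rw [ih (p1+1) (p2-1) (by omega) (by omega) (by omega)]
            rw [hseg, pvPal_sandwich, hn1, hn2]
            simp [hne]
          · simp only [List.contains_eq_mem, e1, e2, decide_false,
              Bool.false_eq_true, if_neg, not_false_iff, hne, ne_eq, if_pos]
            rw [hseg, pvPal_sandwich]
            simp [hne]
    · rw [pvLoopA]
      simp only [hlt, dif_neg, not_false_iff]
      exact (pvSeg_short cs _ _ (by omega)).symm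

-- ===== VERDICT (by name: the statement is the Claim_ definition above) =====
theorem Plindrom_spec : Claim_equal_Plindrom := by
  intro s _
  unfold Spec_Plindrom Plindrom Plindrom_alt
  set cs := s.toList with hcs
  rcases Nat.eq_zero_or_pos cs.length with h0 | hpos
  · have : cs = [] := List.eq_nil_of_length_eq_zero h0
    rw [this, pvLoopA]
    simp
  · rw [pvLoopA_eq cs.length cs 0 ((cs.length : Int) - 1) (by omega) (by omega) (by omega)]
    unfold pvSeg pvPal
    have h1 : ((0 : Int)).toNat = 0 := rfl
    have h2 : (((cs.length : Int) - 1) + 1).toNat = cs.length := by omega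
    rw [h1, h2]
    simp
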